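-- pv_equiv track=rewrite | github.com/nikhila29/10XAcademy | Python programs/diff_sum_even_odd.py | difference_sum_even_odd_index
-- ===== SOURCE A (Python) =====
-- def difference_sum_even_odd_index(numbers):
--     even=0
--     odd=0
--     for i in range(len(numbers)):
--
--         if i%2==0:
--             even+=numbers[i]
--         else:
--             odd+=numbers[i]
--     return even - odd
-- ===== SOURCE B (Python) =====
-- def difference_sum_even_odd_index(numbers):
--     result = 0
--     for x in reversed(numbers):
--         result = x - result
--     return result
-- ===== Notes on version B (the rewrite author's own statement) =====
-- stated objective: simpler
-- what changed: Replaced the index-parity branching loop with two accumulators by a single-accumulator alternating-sign fold over the reversed list (result = x - result), with no indexing and no parity test.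
import Mathlib
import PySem

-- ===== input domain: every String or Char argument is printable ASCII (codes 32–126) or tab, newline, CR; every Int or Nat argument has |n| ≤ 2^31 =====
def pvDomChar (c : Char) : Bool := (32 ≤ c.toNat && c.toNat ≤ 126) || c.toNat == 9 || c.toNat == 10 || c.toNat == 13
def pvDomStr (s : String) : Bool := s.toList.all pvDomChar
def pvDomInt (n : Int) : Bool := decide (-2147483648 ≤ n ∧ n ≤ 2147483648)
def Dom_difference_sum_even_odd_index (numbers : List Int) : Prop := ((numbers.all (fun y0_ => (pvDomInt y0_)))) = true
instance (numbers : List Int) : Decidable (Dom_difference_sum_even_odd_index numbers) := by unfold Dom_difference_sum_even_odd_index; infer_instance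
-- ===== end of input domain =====

-- B: single-accumulator alternating-sign fold over the reversed list (simpler: no indexing, no parity branch).
-- ===== PORT A =====
def difference_sum_even_odd_index (numbers : List Int) : Int :=
  let st := (PySem.List.pyRange 0 numbers.length 1).foldl
    (fun (p : Int × Int) (i : Int) =>
      if i % 2 == 0 then (p.1 + PySem.List.pyGetD numbers i 0, p.2)
      else (p.1, p.2 + PySem.List.pyGetD numbers i 0)) (0, 0)
  st.1 - st.2

-- ===== PORT B =====
def difference_sum_even_odd_index_alt (numbers : List Int) : Int :=
  numbers.reverse.foldl (fun result x => x - result) 0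

-- ===== PRECONDITION & SPEC =====
def Spec_difference_sum_even_odd_index (numbers : List Int) (out : Int) : Prop := out = difference_sum_even_odd_index_alt numbers
instance (numbers : List Int) (out : Int) : Decidable (Spec_difference_sum_even_odd_index numbers out) := by unfold Spec_difference_sum_even_odd_index; infer_instance

-- ===== CLAIM (what is proved, stated in full; the proofs are below) =====
def Claim_equal_difference_sum_even_odd_index : Prop := ∀ (numbers : List Int), Dom_difference_sum_even_odd_index numbers → Spec_difference_sum_even_odd_index numbers (difference_sum_even_odd_index numbers)

-- ===== LEMMAS AND PROOFS =====

-- sum at even indices / odd indices, defined structurally (indices shift on cons)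
mutual
def pvEvenSum : List Int → Int
  | [] => 0
  | a :: xs => a + pvOddSum xs
def pvOddSum : List Int → Int
  | [] => 0
  | _ :: xs => pvEvenSum xs
end

-- B equals pvEvenSum - pvOddSum
theorem pvB_eq (xs : List Int) : xs.reverse.foldl (fun result x => x - result) 0 = pvEvenSum xs - pvOddSum xs := by
  rw [List.foldl_reverse]
  induction xs with
  | nil => simp [pvEvenSum, pvOddSum]
  | cons a xs ih => simp [pvEvenSum, pvOddSum, List.foldr, ih]; ring

-- A's loop from index k over list L computes the even/odd sums of L.drop k, swapped by the parity of k
theorem pvA_loop (L : List Int) (m : Nat) : ∀ (k : Nat) (e o : Int), L.length - k = m →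
    (PySem.List.pyRange (k : Int) (L.length : Int) 1).foldl
      (fun (p : Int × Int) (i : Int) =>
        if i % 2 == 0 then (p.1 + PySem.List.pyGetD L i 0, p.2)
        else (p.1, p.2 + PySem.List.pyGetD L i 0)) (e, o) =
    (if k % 2 = 0 then (e + pvEvenSum (L.drop k), o + pvOddSum (L.drop k))
     else (e + pvOddSum (L.drop k), o + pvEvenSum (L.drop k))) := by
  induction m with
  | zero =>
    intro k e o hm
    have hk : L.length ≤ k := by omega
    rw [PySem.List.pyRange_one_eq_nil (by exact_mod_cast hk)]
    rw [List.drop_eq_nil_of_le hk]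
    simp [pvEvenSum, pvOddSum]
  | succ m ih =>
    intro k e o hm
    have hk : k < L.length := by omega
    rw [PySem.List.pyRange_one_cons (by exact_mod_cast hk)]
    rw [List.foldl_cons]
    have hd : L.drop k = L[k] :: L.drop (k + 1) := List.drop_eq_getElem_cons hk
    have hget : PySem.List.pyGetD L (k : Int) 0 = L[k] := by
      rw [PySem.List.pyGetD_natCast]; exact List.getD_eq_getElem L 0 hk
    have hcast : ((k : Int) + 1) = ((k + 1 : Nat) : Int) := by push_cast; ring
    by_cases hpar : k % 2 = 0
    · have : ((k : Int) % 2 == 0) = true := by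
        simp; omega
      rw [this]
      rw [hcast, ih (k+1) _ _ (by omega)]
      have hpar1 : ¬ (k+1) % 2 = 0 := by omega
      rw [if_neg hpar1, if_pos hpar, hd]
      simp [pvEvenSum, pvOddSum, hget]; ring
    · have : ((k : Int) % 2 == 0) = false := by
        simp; omega
      rw [this]
      simp only [Bool.false_eq_true, if_false]
      rw [hcast, ih (k+1) _ _ (by omega)]
      have hpar1 : (k+1) % 2 = 0 := by omega
      rw [if_pos hpar1, if_neg hpar, hd]
      simp [pvEvenSum, pvOddSum, hget]; ring

-- ===== VERDICT (by name: the statement is the Claim_ definition above) =====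
theorem difference_sum_even_odd_index_spec : Claim_equal_difference_sum_even_odd_index := by
  intro numbers _
  unfold Spec_difference_sum_even_odd_index difference_sum_even_odd_index difference_sum_even_odd_index_alt
  rw [pvB_eq]
  have h := pvA_loop numbers numbers.length 0 0 0 (by omega)
  rw [if_pos (by norm_num : (0:Nat) % 2 = 0)] at h
  simp only [Nat.cast_zero, zero_add, List.drop_zero] at h
  simp only [h]
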